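-- pv_equiv track=rewrite | github.com/bee85919/coding-test-python | 프로그래머스/unrated/181881. 조건에 맞게 수열 변환하기 2/조건에 맞게 수열 변환하기 2.py | solution
-- ===== SOURCE A (Python) =====
-- def function(arr):
--     n = len(arr)
--     for i in range(n):
--         ai = arr[i]
--         if ai >= 50 and ai%2 == 0: arr[i] //= 2
--         if arr[i] < 50 and arr[i]%2 == 1:
--             arr[i] = arr[i]*2 + 1
--     return arr
--
-- def solution(arr):
--     cnt = 0
--     while True:
--         _arr = arr[:]
--         arr = function(arr)
--         if _arr == arr:
--             return cnt
--         cnt += 1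
-- ===== SOURCE B (Python) =====
-- def solution(arr):
--     cnt = 0
--     for i in range(len(arr)):
--         x = arr[i]
--         steps = 0
--         while True:
--             y = x
--             if y >= 50 and y % 2 == 0: y //= 2
--             if y < 50 and y % 2 == 1: y = y*2 + 1
--             if y == x: break
--             x = y
--             steps += 1
--         arr[i] = x
--         cnt = max(cnt, steps)
--     return cnt
-- ===== Notes on version B (the rewrite author's own statement) =====
-- stated objective: alternative
-- what changed: B replaces A's repeated whole-array passes (each making a full copy and a full list comparison until nothing changes) by one loop over the indices that stabilizes each element independently with an inner while loop and returns the maximum per-element step count, which equals A's global pass count.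
import Mathlib
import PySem

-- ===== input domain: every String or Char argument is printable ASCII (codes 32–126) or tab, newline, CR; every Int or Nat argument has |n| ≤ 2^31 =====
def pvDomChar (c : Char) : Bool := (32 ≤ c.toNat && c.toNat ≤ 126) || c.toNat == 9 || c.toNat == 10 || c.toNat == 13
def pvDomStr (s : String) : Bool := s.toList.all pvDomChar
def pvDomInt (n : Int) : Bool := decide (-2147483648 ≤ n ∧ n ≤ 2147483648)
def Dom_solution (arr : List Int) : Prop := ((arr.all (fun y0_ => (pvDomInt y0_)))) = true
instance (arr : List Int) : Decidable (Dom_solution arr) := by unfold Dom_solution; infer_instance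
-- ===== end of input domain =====

-- B stabilizes each element independently and returns the max per-element step count instead of
-- A's repeated full-array passes (equal results; equivalence is about the RETURN value — both
-- Pythons also mutate arr in place to the same stabilized values).
-- Both while-True loops are ported with fuel 100, which is sufficient whenever the Python
-- terminates on Dom_solution inputs (at most ~31 halvings plus ~6 doublings per element for
-- |x| ≤ 2^31); both Pythons diverge identically on odd elements below -1, and with equal fuel
-- the two ports agree on every input, so no precondition is needed.

-- ===== PORT A =====
-- per-element body of A's helper `function`: the two sequential ifs on arr[i]
def fA (x : Int) : Int :=
  let x1 := if 50 ≤ x ∧ PySem.Int.mod x 2 = 0 then PySem.Int.floordiv x 2 else x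
  if x1 < 50 ∧ PySem.Int.mod x1 2 = 1 then x1 * 2 + 1 else x1

-- A's `function`: the for-loop rewrites each arr[i] independently, i.e. maps fA over arr
def functionA (arr : List Int) : List Int := arr.map fA

def solLoop : Nat → Int → List Int → Int
  | 0, cnt, _ => cnt
  | fuel + 1, cnt, arr =>
    let arr' := functionA arr
    if arr' = arr then cnt else solLoop fuel (cnt + 1) arr'

def solution (arr : List Int) : Int := solLoop 100 0 arr

-- ===== PORT B =====
-- Source B's per-element transform (same two sequential ifs)
def fB (x : Int) : Int :=
  let y1 := if 50 ≤ x ∧ PySem.Int.mod x 2 = 0 then PySem.Int.floordiv x 2 else x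
  if y1 < 50 ∧ PySem.Int.mod y1 2 = 1 then y1 * 2 + 1 else y1

-- Source B's inner while loop: returns (stabilized value, steps taken)
def eltLoop : Nat → Int → Nat → Int × Nat
  | 0, x, steps => (x, steps)
  | fuel + 1, x, steps =>
    let y := fB x
    if y = x then (x, steps) else eltLoop fuel y (steps + 1)

def solution_alt (arr : List Int) : Int :=
  arr.foldl (fun cnt x => max cnt (((eltLoop 100 x 0).2 : Nat) : Int)) 0

-- ===== PRECONDITION & SPEC =====
def Spec_solution (arr : List Int) (out : Int) : Prop := out = solution_alt arr
instance (arr : List Int) (out : Int) : Decidable (Spec_solution arr out) := by unfold Spec_solution; infer_instance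

-- ===== CLAIM (what is proved, stated in full; the proofs are below) =====
def Claim_equal_solution : Prop := ∀ (arr : List Int), Dom_solution arr → Spec_solution arr (solution arr)

-- ===== LEMMAS AND PROOFS =====

theorem fB_eq_fA : fB = fA := rfl

-- number of non-trivial applications of fA until fixed, capped by fuel
def gsteps : Nat → Int → Nat
  | 0, _ => 0
  | fuel + 1, x => if fA x = x then 0 else gsteps fuel (fA x) + 1

theorem eltLoop_snd (fuel : Nat) : ∀ (x : Int) (s : Nat), (eltLoop fuel x s).2 = s + gsteps fuel x := by
  induction fuel with
  | zero => intro x s; simp [eltLoop, gsteps]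
  | succ n ih =>
    intro x s
    simp only [eltLoop, gsteps, fB_eq_fA]
    by_cases h : fA x = x
    · simp [h]
    · simp [h, ih]; omega

theorem gsteps_fix (fuel : Nat) (x : Int) (h : fA x = x) : gsteps fuel x = 0 := by
  cases fuel <;> simp [gsteps, h]

def Mr (fuel : Nat) (arr : List Int) : Nat :=
  arr.foldr (fun x m => max (gsteps fuel x) m) 0

theorem Mr_fix (fuel : Nat) (arr : List Int) (h : ∀ x ∈ arr, fA x = x) : Mr fuel arr = 0 := by
  induction arr with
  | nil => rfl
  | cons x t ih =>
    simp only [Mr, List.foldr] at *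
    rw [gsteps_fix fuel x (h x (by simp)), ih (fun y hy => h y (by simp [hy]))]
    omega

theorem map_fix (arr : List Int) (h : arr.map fA = arr) : ∀ x ∈ arr, fA x = x := by
  induction arr with
  | nil => simp
  | cons x t ih =>
    simp only [List.map, List.cons.injEq] at h
    intro y hy
    rcases List.mem_cons.mp hy with hy | hy
    · rw [hy]; exact h.1
    · exact ih h.2 y hy

theorem Mr_step (fuel : Nat) (arr : List Int) (h : arr.map fA ≠ arr) :
    Mr (fuel + 1) arr = 1 + Mr fuel (arr.map fA) := by
  induction arr with
  | nil => simp at h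
  | cons x t ih =>
    by_cases ht : t.map fA = t
    · have hx : fA x ≠ x := by
        intro hx; exact h (by simp [List.map, hx, ht])
      have ht0 : Mr (fuel + 1) t = 0 := Mr_fix _ _ (map_fix t ht)
      have ht0' : Mr fuel (t.map fA) = 0 := by
        rw [ht]; exact Mr_fix _ _ (map_fix t ht)
      simp only [Mr, List.foldr, List.map] at *
      rw [gsteps, if_neg hx, ht0, ht0']
      omega
    · have ihs := ih ht
      simp only [Mr, List.foldr, List.map] at *
      rw [ihs, gsteps]
      by_cases hx : fA x = x
      · rw [if_pos hx, hx, gsteps_fix fuel x hx]; omega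
      · rw [if_neg hx]; omega

theorem solLoop_eq (fuel : Nat) : ∀ (cnt : Int) (arr : List Int),
    solLoop fuel cnt arr = cnt + (Mr fuel arr : Int) := by
  induction fuel with
  | zero =>
    intro cnt arr
    have : Mr 0 arr = 0 := by
      induction arr with
      | nil => rfl
      | cons x t ih => simp only [Mr, List.foldr, gsteps] at *; omega
    simp [solLoop, this]
  | succ n ih =>
    intro cnt arr
    simp only [solLoop, functionA]
    by_cases h : arr.map fA = arr
    · rw [if_pos h, Mr_fix _ _ (map_fix arr h)]; simp
    · rw [if_neg h, ih, Mr_step n arr h]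
      push_cast
      ring

theorem foldl_max (arr : List Int) : ∀ (c : Nat),
    arr.foldl (fun cnt x => max cnt (((eltLoop 100 x 0).2 : Nat) : Int)) (c : Int)
      = ((max c (Mr 100 arr) : Nat) : Int) := by
  induction arr with
  | nil => intro c; simp [Mr]
  | cons x t ih =>
    intro c
    have hg : (eltLoop 100 x 0).2 = gsteps 100 x := by rw [eltLoop_snd]; omega
    have hcast : (max (c : Int) ((gsteps 100 x : Nat) : Int)) = ((max c (gsteps 100 x) : Nat) : Int) := by
      push_cast; rfl
    simp only [List.foldl, hg, hcast, ih]
    congr 1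
    simp only [Mr, List.foldr]
    omega

theorem alt_eq (arr : List Int) : solution_alt arr = (Mr 100 arr : Int) := by
  have := foldl_max arr 0
  simpa [solution_alt] using this

-- ===== VERDICT (by name: the statement is the Claim_ definition above) =====
theorem solution_spec : Claim_equal_solution := by
  intro arr _
  show solution arr = solution_alt arr
  rw [solution, solLoop_eq, alt_eq]
  simp
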